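-- pv_equiv track=rewrite | github.com/GeePokey/MoonBaseAlpha | AOC2020/D6_k.py | countYesTotal
-- ===== SOURCE A (Python) =====
-- def countYesTotal(oneGroup):
--     alphabet = ["a","b","c","d","e","f","g","h","i","j","k","l","m","n","o","p","q","r","s","t","u","v","w","x","y","z"]
--     total = 0
--     eachPerson = oneGroup.split("\n")
--     for letter in alphabet:
--         flag = 0
--         for person in eachPerson:
--
--             if letter in person:
--                flag += 1
--                continue
--         if flag == len(eachPerson):
--             total += 1
--     return total
-- ===== SOURCE B (Python) =====
-- def countYesTotal(oneGroup):
--     common = set("abcdefghijklmnopqrstuvwxyz")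
--     for person in oneGroup.split("\n"):
--         common &= set(person)
--     return len(common)
-- ===== Notes on version B (the rewrite author's own statement) =====
-- stated objective: idiomatic
-- what changed: Replaced the 26-letter outer scan with per-person substring tests by a single pass that intersects the set of each person's characters with the lowercase alphabet set and returns its size.
import Mathlib
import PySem

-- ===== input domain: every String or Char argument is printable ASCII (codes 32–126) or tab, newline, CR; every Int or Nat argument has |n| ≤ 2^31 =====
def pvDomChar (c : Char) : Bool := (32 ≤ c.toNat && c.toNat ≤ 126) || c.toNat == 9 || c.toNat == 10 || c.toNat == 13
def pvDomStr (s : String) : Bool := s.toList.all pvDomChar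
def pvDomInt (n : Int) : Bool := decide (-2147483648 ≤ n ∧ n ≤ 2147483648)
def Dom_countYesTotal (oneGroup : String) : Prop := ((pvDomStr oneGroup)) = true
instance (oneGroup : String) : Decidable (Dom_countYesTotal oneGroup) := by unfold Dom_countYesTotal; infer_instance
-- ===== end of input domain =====

-- B replaces A's 26-letter outer scan of per-person substring tests by one pass intersecting per-person character sets with the lowercase-alphabet set (idiomatic; return value only).

-- ===== PORT A =====
def countYesTotal (oneGroup : String) : Int :=
  let alphabet : List String := ["a","b","c","d","e","f","g","h","i","j","k","l","m","n","o","p","q","r","s","t","u","v","w","x","y","z"]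
  let eachPerson : List (List Char) := PySem.Chars.splitOn oneGroup.toList "\n".toList
  alphabet.foldl (fun total letter =>
    let flag : Int := eachPerson.foldl (fun flag person =>
      if PySem.Chars.isIn letter.toList person then flag + 1 else flag) 0
    if flag = (eachPerson.length : Int) then total + 1 else total) 0

-- ===== PORT B =====
def countYesTotal_alt (oneGroup : String) : Int :=
  let common0 : PySem.Set Char := PySem.Set.ofList "abcdefghijklmnopqrstuvwxyz".toList
  let common : PySem.Set Char := (PySem.Chars.splitOn oneGroup.toList "\n".toList).foldl
    (fun s person => PySem.Set.inter s (PySem.Set.ofList person)) common0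
  PySem.Set.len common

-- ===== PRECONDITION & SPEC =====
def Spec_countYesTotal (oneGroup : String) (out : Int) : Prop := out = countYesTotal_alt oneGroup
instance (oneGroup : String) (out : Int) : Decidable (Spec_countYesTotal oneGroup out) := by unfold Spec_countYesTotal; infer_instance

-- ===== CLAIM (what is proved, stated in full; the proofs are below) =====
def Claim_equal_countYesTotal : Prop := ∀ (oneGroup : String), Dom_countYesTotal oneGroup → Spec_countYesTotal oneGroup (countYesTotal oneGroup)

-- ===== LEMMAS AND PROOFS =====

-- a counting foldl is countP
theorem pv_foldl_if_add_one {α : Type} (q : α → Bool) (l : List α) (i : Int) :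
    l.foldl (fun f p => if q p then f + 1 else f) i = i + (l.countP q : Int) := by
  induction l generalizing i with
  | nil => simp
  | cons x xs ih =>
    by_cases h : q x
    · simp [h, ih]; ring
    · simp [h, ih]

-- 'letter in person' for a one-character letter is char membership
theorem pv_isIn_singleton (c : Char) (p : List Char) :
    PySem.Chars.isIn [c] p = p.contains c := by
  by_cases h : c ∈ p
  · obtain ⟨s, t, rfl⟩ := List.append_of_mem h
    have h1 : PySem.Chars.isIn [c] (s ++ c :: t) = true := by
      rw [PySem.Chars.isIn_iff_infix]; exact ⟨s, t, by simp⟩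
    simp [h1, h]
  · have h1 : PySem.Chars.isIn [c] p = false := by
      rw [PySem.Chars.isIn_eq_false_iff]
      intro hinf
      exact h (hinf.subset (by simp))
    simp [h1, h]

-- folding set intersections is one filter
theorem pv_foldl_inter (persons : List (List Char)) (s : List Char) :
    persons.foldl (fun s person => PySem.Set.inter s (PySem.Set.ofList person)) s
      = s.filter (fun c => persons.all (fun p => p.contains c)) := by
  induction persons generalizing s with
  | nil => simp
  | cons p ps ih =>
    simp only [List.foldl_cons, ih]
    show (PySem.Set.inter s (PySem.Set.ofList p)).filter _ = _
    simp only [PySem.Set.inter, List.filter_filter]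
    apply List.filter_congr
    intro c _
    simp [List.all_cons, Bool.and_comm]

theorem pv_alphabet_map :
    (["a","b","c","d","e","f","g","h","i","j","k","l","m","n","o","p","q","r","s","t","u","v","w","x","y","z"] : List String)
      = ("abcdefghijklmnopqrstuvwxyz".toList).map (fun c => String.ofList [c]) := by decide

-- ===== VERDICT (by name: the statement is the Claim_ definition above) =====
theorem countYesTotal_spec : Claim_equal_countYesTotal := by
  intro oneGroup _
  unfold Spec_countYesTotal countYesTotal countYesTotal_alt
  simp only []
  set persons := PySem.Chars.splitOn oneGroup.toList "\n".toList with hp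
  rw [pv_alphabet_map]
  have hA : ∀ (letters : List Char) (i : Int),
      (letters.map (fun c => String.ofList [c])).foldl
        (fun total letter =>
          let flag : Int := persons.foldl (fun flag person =>
            if PySem.Chars.isIn letter.toList person then flag + 1 else flag) 0
          if flag = (persons.length : Int) then total + 1 else total) i
      = i + (letters.countP (fun c => persons.all (fun p => p.contains c)) : Int) := by
    intro letters i
    induction letters generalizing i with
    | nil => simp
    | cons c cs ih =>
      simp only [List.map_cons, List.foldl_cons, List.countP_cons, String.toList_ofList]
      have hflag : (persons.foldl (fun flag person =>
          if PySem.Chars.isIn [c] person then flag + 1 else flag) (0:Int))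
          = (persons.countP (fun p => p.contains c) : Int) := by
        rw [pv_foldl_if_add_one, zero_add]
        congr 1
        exact List.countP_congr (fun p _ => by rw [pv_isIn_singleton])
      simp only [hflag, ih]
      by_cases h : ∀ a ∈ persons, c ∈ a
      · simp
        split_ifs
        · ring
      · simp
        split_ifs
        · ring
  rw [hA, pv_foldl_inter]
  have hnd : ("abcdefghijklmnopqrstuvwxyz".toList).Nodup := by decide
  have hself := PySem.Set.ofList_eq_self_of_nodup _ hnd
  rw [hself]
  simp [PySem.Set.len, List.countP_eq_length_filter]
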